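-- pv_equiv track=rewrite | github.com/ruoxuanbai1/embodied-rta | analyze_r2_fixed.py | compress_events
-- ===== SOURCE A (Python) =====
-- def compress_events(seq):
--     """压缩连续事件：[0,0,1,1,1,0,0,1,1,0] → 事件起始位置 [2, 7]"""
--     events = []
--     in_event = False
--     for i, val in enumerate(seq):
--         if val and not in_event:
--             events.append(i)
--             in_event = True
--         elif not val:
--             in_event = False
--     return events
-- ===== SOURCE B (Python) =====
-- def compress_events(seq):
--     """压缩连续事件：[0,0,1,1,1,0,0,1,1,0] → 事件起始位置 [2, 7]"""
--     seq = list(seq)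
--     n = len(seq)
--     events = []
--     i = 0
--     while i < n:
--         k = bool(seq[i])
--         j = i + 1
--         while j < n and bool(seq[j]) == k:
--             j += 1
--         if k:
--             events.append(i)
--         i = j
--     return events
-- ===== Notes on version B (the rewrite author's own statement) =====
-- stated objective: alternative
-- what changed: B collapses the sequence into maximal runs of equal truthiness and reads off each truthy run's start index, instead of A's per-element scan with an in_event flag.
import Mathlib
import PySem

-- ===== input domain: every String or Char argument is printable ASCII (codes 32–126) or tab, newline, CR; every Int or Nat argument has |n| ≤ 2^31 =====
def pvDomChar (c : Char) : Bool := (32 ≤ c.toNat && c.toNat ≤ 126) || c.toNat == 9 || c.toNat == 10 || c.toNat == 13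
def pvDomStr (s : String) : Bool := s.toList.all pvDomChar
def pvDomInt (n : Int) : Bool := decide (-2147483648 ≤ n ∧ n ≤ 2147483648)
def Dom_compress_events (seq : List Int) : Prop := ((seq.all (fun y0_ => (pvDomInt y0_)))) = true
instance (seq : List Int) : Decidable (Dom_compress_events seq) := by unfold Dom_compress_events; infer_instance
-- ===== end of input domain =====

-- B groups the sequence into maximal runs of equal truthiness and emits each truthy
-- run's start index, instead of A's per-element scan with an in_event flag (alternative).

-- ===== PORT A =====
-- the body of A's for-loop: state = (events, in_event), i the enumerate index
def loopA : List Int → Nat → List Int → Bool → List Int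
  | [], _, events, _ => events
  | v :: vs, i, events, inEvent =>
    if v ≠ 0 ∧ inEvent = false then loopA vs (i + 1) (events ++ [(i : Int)]) true
    else if v = 0 then loopA vs (i + 1) events false
    else loopA vs (i + 1) events inEvent

def compress_events (seq : List Int) : List Int := loopA seq 0 [] false

-- ===== PORT B =====
-- B's inner while loop finds the end of the run starting at i by scanning equal
-- truthiness; here: takeWhile/dropWhile on the tail with the head's truthiness key.
def goRuns (seq : List Int) (pos : Nat) : List Int :=
  match seq with
  | [] => []
  | x :: xs =>
    let t := xs.takeWhile (fun y => decide (y ≠ 0) == decide (x ≠ 0))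
    let r := xs.dropWhile (fun y => decide (y ≠ 0) == decide (x ≠ 0))
    (if x ≠ 0 then [(pos : Int)] else []) ++ goRuns r (pos + 1 + t.length)
termination_by seq.length
decreasing_by
  have := List.length_dropWhile_le (fun y => decide (y ≠ 0) == decide (x ≠ 0)) xs
  simpa using Nat.lt_succ_of_le this

def compress_events_alt (seq : List Int) : List Int := goRuns seq 0

-- ===== PRECONDITION & SPEC =====
def Spec_compress_events (seq : List Int) (out : List Int) : Prop := out = compress_events_alt seq
instance (seq : List Int) (out : List Int) : Decidable (Spec_compress_events seq out) := by unfold Spec_compress_events; infer_instance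

-- ===== CLAIM (what is proved, stated in full; the proofs are below) =====
def Claim_equal_compress_events : Prop := ∀ (seq : List Int), Dom_compress_events seq → Spec_compress_events seq (compress_events seq)

-- ===== LEMMAS AND PROOFS =====

-- a truthy run is traversed with the flag already set: nothing is appended
theorem loopA_truthy_run : ∀ (t : List Int), (∀ y ∈ t, y ≠ 0) →
    ∀ (r : List Int) (i : Nat) (evs : List Int),
      loopA (t ++ r) i evs true = loopA r (i + t.length) evs true
  | [], _, r, i, evs => by simp
  | y :: ys, h, r, i, evs => by
    have hy : y ≠ 0 := h y (by simp)
    have ih := loopA_truthy_run ys (fun z hz => h z (by simp [hz])) r (i + 1) evs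
    rw [List.cons_append]
    rw [show loopA (y :: (ys ++ r)) i evs true = loopA (ys ++ r) (i + 1) evs true by
      simp [loopA, hy]]
    rw [ih]; congr 1; simp; omega

-- a falsy run is traversed with the flag cleared: nothing is appended
theorem loopA_falsy_run : ∀ (t : List Int), (∀ y ∈ t, y = 0) →
    ∀ (r : List Int) (i : Nat) (evs : List Int),
      loopA (t ++ r) i evs false = loopA r (i + t.length) evs false
  | [], _, r, i, evs => by simp
  | y :: ys, h, r, i, evs => by
    have hy : y = 0 := h y (by simp)
    have ih := loopA_falsy_run ys (fun z hz => h z (by simp [hz])) r (i + 1) evs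
    rw [List.cons_append]
    rw [show loopA (y :: (ys ++ r)) i evs false = loopA (ys ++ r) (i + 1) evs false by
      simp [loopA, hy]]
    rw [ih]; congr 1; simp; omega

-- when the next element is falsy (or the list ends), the flag is irrelevant
theorem loopA_flag_irrel (r : List Int) (i : Nat) (evs : List Int)
    (h : r = [] ∨ ∃ z zs, r = z :: zs ∧ z = 0) :
    loopA r i evs true = loopA r i evs false := by
  rcases h with h | ⟨z, zs, rfl, rfl⟩
  · subst h; rfl
  · simp [loopA]

theorem loopA_eq_goRuns : ∀ (seq : List Int) (i : Nat) (evs : List Int),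
    loopA seq i evs false = evs ++ goRuns seq i
  | [], i, evs => by simp [loopA, goRuns]
  | x :: xs, i, evs => by
    by_cases hx : x = 0
    · -- falsy head: the whole falsy run leaves the state unchanged
      have hmem : ∀ y ∈ xs.takeWhile (fun y => decide (y ≠ 0) == decide (x ≠ 0)), y = 0 := by
        intro y hy
        have := List.mem_takeWhile_imp hy
        simpa [hx] using this
      have hsplit := List.takeWhile_append_dropWhile
        (p := fun y => decide (y ≠ 0) == decide (x ≠ 0)) (l := xs)
      have hrun := loopA_falsy_run _ hmem
        (xs.dropWhile (fun y => decide (y ≠ 0) == decide (x ≠ 0))) (i + 1) evs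
      have ih := loopA_eq_goRuns (xs.dropWhile (fun y => decide (y ≠ 0) == decide (x ≠ 0)))
        (i + 1 + (xs.takeWhile (fun y => decide (y ≠ 0) == decide (x ≠ 0))).length) evs
      calc loopA (x :: xs) i evs false
          = loopA xs (i + 1) evs false := by simp [loopA, hx]
        _ = loopA (xs.dropWhile (fun y => decide (y ≠ 0) == decide (x ≠ 0)))
              (i + 1 + (xs.takeWhile (fun y => decide (y ≠ 0) == decide (x ≠ 0))).length)
              evs false := by
                conv_lhs => rw [← hsplit]
                exact hrun
        _ = evs ++ goRuns (x :: xs) i := by rw [ih]; simp [goRuns, hx]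
    · -- truthy head: record i, then the rest of the truthy run changes nothing
      have hmem : ∀ y ∈ xs.takeWhile (fun y => decide (y ≠ 0) == decide (x ≠ 0)), y ≠ 0 := by
        intro y hy
        have := List.mem_takeWhile_imp hy
        simpa [hx] using this
      have hsplit := List.takeWhile_append_dropWhile
        (p := fun y => decide (y ≠ 0) == decide (x ≠ 0)) (l := xs)
      have hrun := loopA_truthy_run _ hmem
        (xs.dropWhile (fun y => decide (y ≠ 0) == decide (x ≠ 0))) (i + 1) (evs ++ [(i : Int)])
      have hhead : xs.dropWhile (fun y => decide (y ≠ 0) == decide (x ≠ 0)) = [] ∨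
          ∃ z zs, xs.dropWhile (fun y => decide (y ≠ 0) == decide (x ≠ 0)) = z :: zs ∧ z = 0 := by
        cases hd : xs.dropWhile (fun y => decide (y ≠ 0) == decide (x ≠ 0)) with
        | nil => exact Or.inl rfl
        | cons z zs =>
          right
          refine ⟨z, zs, rfl, ?_⟩
          have hz := List.head_dropWhile_not
            (p := fun y => decide (y ≠ 0) == decide (x ≠ 0)) (l := xs) (by rw [hd]; exact List.cons_ne_nil z zs)
          simp only [hd, List.head_cons] at hz
          simpa [hx] using hz
      have ih := loopA_eq_goRuns (xs.dropWhile (fun y => decide (y ≠ 0) == decide (x ≠ 0)))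
        (i + 1 + (xs.takeWhile (fun y => decide (y ≠ 0) == decide (x ≠ 0))).length)
        (evs ++ [(i : Int)])
      calc loopA (x :: xs) i evs false
          = loopA xs (i + 1) (evs ++ [(i : Int)]) true := by simp [loopA, hx]
        _ = loopA (xs.dropWhile (fun y => decide (y ≠ 0) == decide (x ≠ 0)))
              (i + 1 + (xs.takeWhile (fun y => decide (y ≠ 0) == decide (x ≠ 0))).length)
              (evs ++ [(i : Int)]) true := by
              conv_lhs => rw [← hsplit]
              exact hrun
        _ = loopA (xs.dropWhile (fun y => decide (y ≠ 0) == decide (x ≠ 0)))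
              (i + 1 + (xs.takeWhile (fun y => decide (y ≠ 0) == decide (x ≠ 0))).length)
              (evs ++ [(i : Int)]) false := loopA_flag_irrel _ _ _ hhead
        _ = evs ++ goRuns (x :: xs) i := by rw [ih]; simp [goRuns, hx]
  termination_by seq => seq.length
  decreasing_by
    all_goals
      have := List.length_dropWhile_le (fun y => decide (y ≠ 0) == decide (x ≠ 0)) xs
      simpa using Nat.lt_succ_of_le this

-- ===== VERDICT (by name: the statement is the Claim_ definition above) =====
theorem compress_events_spec : Claim_equal_compress_events := by
  intro seq _
  unfold Spec_compress_events compress_events compress_events_alt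
  simpa using loopA_eq_goRuns seq 0 []
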